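-- pv_equiv track=rewrite | github.com/baothais/unit_testing | practice_python/practice4.py | ascii_sort
-- ===== SOURCE A (Python) =====
-- def ascii_sort(lst):
--     sum_lst = []
--     for i in lst:
--         sum = 0
--         for j in range(len(i)):
--             sum += ord(i[j])
--         sum_lst.append(sum)
--     return lst[sum_lst.index(min(sum_lst))]
-- ===== SOURCE B (Python) =====
-- def ascii_sort(lst):
--     best = lst[0]
--     best_sum = sum(map(ord, best))
--     for s in lst[1:]:
--         t = sum(map(ord, s))
--         if t < best_sum:
--             best, best_sum = s, t
--     return best
-- ===== Notes on version B (the rewrite author's own statement) =====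
-- stated objective: simpler
-- what changed: B replaces A's materialised list of ASCII sums followed by min() and a second .index() scan with a single running-best pass that keeps the current best string and sum, updating only on a strictly smaller sum so the first minimum still wins.
-- outside the precondition, e.g. on ascii_sort([]): A raises ValueError, B raises IndexError
import Mathlib
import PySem

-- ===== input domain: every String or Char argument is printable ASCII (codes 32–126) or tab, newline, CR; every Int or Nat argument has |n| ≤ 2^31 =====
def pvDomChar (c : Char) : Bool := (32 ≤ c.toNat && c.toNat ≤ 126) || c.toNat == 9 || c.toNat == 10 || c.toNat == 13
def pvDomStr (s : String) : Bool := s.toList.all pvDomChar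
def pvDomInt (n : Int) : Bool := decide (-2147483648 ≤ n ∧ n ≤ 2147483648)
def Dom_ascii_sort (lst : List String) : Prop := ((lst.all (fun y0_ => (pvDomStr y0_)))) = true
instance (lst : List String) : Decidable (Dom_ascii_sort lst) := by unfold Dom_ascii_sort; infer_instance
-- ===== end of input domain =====

-- B replaces A's materialised sum list + min() + .index() scans with one running-best pass
-- (strict-less update, so the first minimum still wins); objective: simpler.

-- ===== PORT A =====
-- inner loop 'sum = 0; for j in range(len(i)): sum += ord(i[j])'
def asciiSumA (i : String) : Int :=
  (PySem.List.pyRange 0 (PySem.Str.len i) 1).foldl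
    (fun s j => s + ((PySem.List.pyGetD i.toList j ' ').toNat : Int)) 0

def ascii_sort (lst : List String) : String :=
  let sum_lst : List Int := lst.foldl (fun sl i => sl ++ [asciiSumA i]) []
  match PySem.List.min? sum_lst (fun y => y) with
  | none => ""            -- min([]) raises ValueError: outside Pre_
  | some m =>
    match PySem.List.index? sum_lst m with
    | some k => (PySem.List.pyGet? lst (k : Int)).getD ""
    | none => ""          -- unreachable: the minimum is a member

-- ===== PORT B =====
-- sum(map(ord, s))
def sumOrd (s : String) : Int := (s.toList.map (fun c => (c.toNat : Int))).sum

def ascii_sort_alt (lst : List String) : String :=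
  let best := (PySem.List.pyGet? lst 0).getD ""    -- lst[0]; raises on [] in Python: outside Pre_
  ((PySem.List.slice lst (some 1) none).foldl
    (fun (b : String × Int) s =>
      let t := sumOrd s
      if t < b.2 then (s, t) else b)
    (best, sumOrd best)).1

-- ===== PRECONDITION & SPEC =====
-- Pre_ excludes only the empty list, on which both Pythons raise (A: ValueError from min([]), B: IndexError from lst[0]).
def Pre_ascii_sort (lst : List String) : Prop := lst ≠ []
instance (lst : List String) : Decidable (Pre_ascii_sort lst) := by unfold Pre_ascii_sort; infer_instance
def pvWitness_ascii_sort : List String := (["ab", "a"])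

def Spec_ascii_sort (lst : List String) (out : String) : Prop := out = ascii_sort_alt lst
instance (lst : List String) (out : String) : Decidable (Spec_ascii_sort lst out) := by unfold Spec_ascii_sort; infer_instance

-- ===== CLAIM (what is proved, stated in full; the proofs are below) =====
def Claim_equal_ascii_sort : Prop := ∀ (lst : List String), Dom_ascii_sort lst → Pre_ascii_sort lst → Spec_ascii_sort lst (ascii_sort lst)

-- ===== LEMMAS AND PROOFS =====

-- the recursive "first strict minimum" selector both ports reduce to
def amin : String → List String → String
  | b, [] => b
  | b, s :: t => if sumOrd s < sumOrd b then amin s t else amin b t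

theorem sumOrd_foldl (l : List Char) : ∀ (a : Int),
    l.foldl (fun s c => s + ((c.toNat : Int))) a = a + (l.map (fun c => (c.toNat : Int))).sum := by
  induction l with
  | nil => simp
  | cons c t ih => intro a; simp [ih]; ring

theorem asciiSumA_eq (i : String) : asciiSumA i = sumOrd i := by
  unfold asciiSumA sumOrd
  rw [show PySem.Str.len i = ((i.toList.length : Nat) : Int) from rfl]
  rw [PySem.List.foldl_pyRange_zero_pyGetD' i.toList ' '
        (fun s c => s + ((c.toNat : Int))) 0]
  rw [sumOrd_foldl]; ring

theorem sumlst_eq (lst : List String) : ∀ (acc : List Int),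
    lst.foldl (fun sl i => sl ++ [asciiSumA i]) acc = acc ++ lst.map sumOrd := by
  induction lst with
  | nil => simp
  | cons h t ih => intro acc; rw [List.foldl_cons, ih]; simp [asciiSumA_eq]

theorem foldl_min_le_init (l : List Int) : ∀ (a : Int), l.foldl min a ≤ a := by
  induction l with
  | nil => simp
  | cons c t ih => intro a; exact le_trans (ih (min a c)) (min_le_left a c)

theorem foldl_min_mem (l : List Int) : ∀ (a : Int), l.foldl min a = a ∨ l.foldl min a ∈ l := by
  induction l with
  | nil => simp
  | cons c t ih => intro a
                   rcases ih (min a c) with h | h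
                   · rcases le_total a c with hac | hac
                     · left; simpa [List.foldl_cons, min_eq_left hac] using h
                     · right; rw [List.foldl_cons, h, min_eq_right hac]; simp
                   · right; rw [List.foldl_cons]; exact List.mem_cons_of_mem _ h

-- A's tail expression on a nonempty list
def pick (h : String) (t : List String) : String :=
  match PySem.List.index? (sumOrd h :: t.map sumOrd) ((t.map sumOrd).foldl min (sumOrd h)) with
  | some k => (PySem.List.pyGet? (h :: t) (k : Int)).getD ""
  | none => ""

theorem A_cons (h : String) (t : List String) : ascii_sort (h :: t) = pick h t := by
  unfold ascii_sort pick
  rw [sumlst_eq]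
  simp [PySem.List.min?_id_cons]

theorem pick_eq_amin (t : List String) : ∀ (h : String), pick h t = amin h t := by
  induction t with
  | nil =>
      intro h
      unfold pick amin
      rw [show ((([] : List String).map sumOrd).foldl min (sumOrd h)) = sumOrd h from rfl,
          PySem.List.index?_cons_self]
      simp
  | cons s t' ih =>
      intro h
      unfold pick
      simp only [List.map_cons, List.foldl_cons]
      by_cases hlt : sumOrd s < sumOrd h
      · rw [min_eq_right hlt.le]
        have hle : (t'.map sumOrd).foldl min (sumOrd s) ≤ sumOrd s := foldl_min_le_init _ _
        have hne : sumOrd h ≠ (t'.map sumOrd).foldl min (sumOrd s) := by omega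
        have hmem : (t'.map sumOrd).foldl min (sumOrd s) ∈ sumOrd s :: t'.map sumOrd := by
          rcases foldl_min_mem (t'.map sumOrd) (sumOrd s) with h1 | h1
          · rw [h1]; simp
          · exact List.mem_cons_of_mem _ h1
        obtain ⟨k, hk⟩ := Option.isSome_iff_exists.mp
          ((PySem.List.index?_isSome_iff _ _).mpr hmem)
        rw [PySem.List.index?_cons_of_ne _ hne, hk]
        have hpick : pick s t' = (PySem.List.pyGet? (s :: t') ((k : Nat) : Int)).getD "" := by
          unfold pick
          rw [hk]
        rw [show amin h (s :: t') = amin s t' from by rw [amin, if_pos hlt], ← ih s, hpick]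
        simp [PySem.List.pyGet?_natCast]
      · rw [min_eq_left (not_lt.mp hlt)]
        rw [show amin h (s :: t') = amin h t' from by rw [amin, if_neg hlt], ← ih h]
        by_cases hm : (t'.map sumOrd).foldl min (sumOrd h) = sumOrd h
        · rw [hm, PySem.List.index?_cons_self]
          unfold pick
          rw [hm, PySem.List.index?_cons_self]
          simp
        · have hle : (t'.map sumOrd).foldl min (sumOrd h) ≤ sumOrd h := foldl_min_le_init _ _
          have hgs : sumOrd h ≤ sumOrd s := not_lt.mp hlt
          have hne_h : sumOrd h ≠ (t'.map sumOrd).foldl min (sumOrd h) := fun e => hm e.symm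
          have hne_s : sumOrd s ≠ (t'.map sumOrd).foldl min (sumOrd h) := by omega
          have hmemL : (t'.map sumOrd).foldl min (sumOrd h) ∈ t'.map sumOrd := by
            rcases foldl_min_mem (t'.map sumOrd) (sumOrd h) with h1 | h1
            · exact absurd h1 hm
            · exact h1
          obtain ⟨k, hk⟩ := Option.isSome_iff_exists.mp
            ((PySem.List.index?_isSome_iff _ _).mpr hmemL)
          rw [PySem.List.index?_cons_of_ne _ hne_h, PySem.List.index?_cons_of_ne _ hne_s, hk]
          unfold pick
          rw [PySem.List.index?_cons_of_ne _ hne_h, hk]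
          simp only [Option.map_some]
          rw [PySem.List.pyGet?_natCast, PySem.List.pyGet?_natCast]
          simp

theorem alt_fold (t : List String) : ∀ (b : String),
    (t.foldl (fun (b : String × Int) s =>
        let ts := sumOrd s
        if ts < b.2 then (s, ts) else b) (b, sumOrd b)) = (amin b t, sumOrd (amin b t)) := by
  induction t with
  | nil => intro b; simp [amin]
  | cons s t ih => intro b
                   by_cases hlt : sumOrd s < sumOrd b
                   · simp [amin, hlt, ih]
                   · simp [amin, hlt, ih]

theorem alt_cons (h : String) (t : List String) : ascii_sort_alt (h :: t) = amin h t := by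
  unfold ascii_sort_alt
  simp [PySem.List.slice_from_one, PySem.List.pyGet?, PySem.List.pyIdx?, alt_fold]

-- ===== VERDICT (by name: the statement is the Claim_ definition above) =====
theorem ascii_sort_spec : Claim_equal_ascii_sort := by
  intro lst _ hpre
  match lst with
  | [] => exact absurd rfl hpre
  | h :: t =>
      show ascii_sort (h :: t) = ascii_sort_alt (h :: t)
      rw [A_cons, alt_cons, pick_eq_amin]
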